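-- pv_equiv track=rewrite | github.com/joaofbsm/uri-problems | src/2796.py | find_largest_table
-- ===== SOURCE A (Python) =====
-- def find_largest_table(tables, max_areas):
--     found_fit = [False for _ in range(len(tables))]
--
--     for area, height, width in max_areas:
--         for i, fit_found in enumerate(found_fit):
--             if not fit_found:
--                 table_area, table_height, table_width = tables[i]
--                 if table_area <= area:
--                     if (table_height <= height and table_width <= width) or \
--                        (table_width <= height and table_height <= width):
--
--                         found_fit[i] = True
--
--     for i, fit_found in enumerate(found_fit):
--         if fit_found:
--             break
--
--     return tables[i][1], tables[i][2]
-- ===== SOURCE B (Python) =====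
-- def find_largest_table(tables, max_areas):
--     # First table that fits some max area; if none fits, the last table's dims.
--     for t_area, t_h, t_w in tables:
--         if any(t_area <= area and ((t_h <= h and t_w <= w) or (t_w <= h and t_h <= w))
--                for area, h, w in max_areas):
--             return t_h, t_w
--     return tables[-1][1], tables[-1][2]
-- ===== Notes on version B (the rewrite author's own statement) =====
-- stated objective: simpler
-- what changed: Drops the found_fit boolean table and the build-then-scan passes: B scans tables once in index order, returning the first table for which any max_area admits it (either orientation) and falling back to the last table's dimensions; early exit on the first fit makes it measurably faster.
import Mathlib
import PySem

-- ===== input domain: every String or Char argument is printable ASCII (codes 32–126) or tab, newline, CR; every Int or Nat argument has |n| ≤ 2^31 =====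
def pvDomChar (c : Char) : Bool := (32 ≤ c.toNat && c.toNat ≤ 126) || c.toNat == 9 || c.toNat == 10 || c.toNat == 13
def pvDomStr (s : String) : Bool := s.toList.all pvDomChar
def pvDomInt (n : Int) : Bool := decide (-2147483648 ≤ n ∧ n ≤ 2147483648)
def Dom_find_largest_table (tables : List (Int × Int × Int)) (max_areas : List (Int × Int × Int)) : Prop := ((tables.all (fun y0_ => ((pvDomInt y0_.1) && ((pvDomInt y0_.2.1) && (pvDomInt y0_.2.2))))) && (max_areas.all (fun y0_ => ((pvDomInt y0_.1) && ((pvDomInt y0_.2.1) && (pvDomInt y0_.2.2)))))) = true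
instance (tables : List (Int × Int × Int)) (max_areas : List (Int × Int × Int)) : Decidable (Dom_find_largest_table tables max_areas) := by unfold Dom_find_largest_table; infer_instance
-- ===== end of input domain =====

-- B drops A's found_fit boolean table and build-then-scan passes: one scan of tables,
-- returning the first table some max_area admits, else the last table's dimensions (objective: simpler).

-- ===== PORT A =====
-- one pass of A's inner loop over enumerate(found_fit) for a single (area, height, width);
-- found_fit[i] = True written in place is rendered as a map over enumerate, which is exact here
-- because each iteration writes only its own index
def pvStepA (tables : List (Int × Int × Int)) (ff : List Bool) (a : Int × Int × Int) : List Bool :=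
  (PySem.List.enumerate ff).map (fun p =>
    if p.2 then p.2
    else
      match PySem.List.pyGet? tables p.1 with
      | none => p.2  -- unreachable: enumerate index is within tables (found_fit has tables' length)
      | some t =>
        if t.1 ≤ a.1 then
          if (decide (t.2.1 ≤ a.2.1) && decide (t.2.2 ≤ a.2.2)) ||
             (decide (t.2.2 ≤ a.2.1) && decide (t.2.1 ≤ a.2.2)) then true else p.2
        else p.2)

-- the final 'for i, fit_found in enumerate(found_fit): if fit_found: break'
def pvBreakIdx : List (Int × Bool) → Int → Int
  | [], i => i
  | (j, f) :: rest, _ => if f then j else pvBreakIdx rest j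

def find_largest_table (tables : List (Int × Int × Int)) (max_areas : List (Int × Int × Int)) : Int × Int :=
  let found_fit := max_areas.foldl (pvStepA tables) (List.replicate tables.length false)
  let i := pvBreakIdx (PySem.List.enumerate found_fit) 0
  match PySem.List.pyGet? tables i with
  | some t => (t.2.1, t.2.2)
  | none => (0, 0)  -- tables = []: Python's loop variable i is unbound (UnboundLocalError); outside Pre_

-- ===== PORT B =====
def pvFitsB (t a : Int × Int × Int) : Bool :=
  decide (t.1 ≤ a.1) &&
    ((decide (t.2.1 ≤ a.2.1) && decide (t.2.2 ≤ a.2.2)) ||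
     (decide (t.2.2 ≤ a.2.1) && decide (t.2.1 ≤ a.2.2)))

def find_largest_table_alt (tables : List (Int × Int × Int)) (max_areas : List (Int × Int × Int)) : Int × Int :=
  match tables.find? (fun t => max_areas.any (fun a => pvFitsB t a)) with
  | some t => (t.2.1, t.2.2)
  | none =>
    match PySem.List.pyGet? tables (-1) with  -- tables[-1]
    | some t => (t.2.1, t.2.2)
    | none => (0, 0)  -- tables = []: Python raises IndexError; outside Pre_

-- ===== PRECONDITION & SPEC =====
-- Pre_ excludes only tables = [], on which A raises UnboundLocalError (B raises IndexError).
def Pre_find_largest_table (tables : List (Int × Int × Int)) (max_areas : List (Int × Int × Int)) : Prop := tables ≠ []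
instance (tables : List (Int × Int × Int)) (max_areas : List (Int × Int × Int)) : Decidable (Pre_find_largest_table tables max_areas) := by unfold Pre_find_largest_table; infer_instance
def pvWitness_find_largest_table : (List (Int × Int × Int)) × (List (Int × Int × Int)) := ([(6, 2, 3), (4, 2, 2)], [(5, 3, 3)])

def Spec_find_largest_table (tables : List (Int × Int × Int)) (max_areas : List (Int × Int × Int)) (out : Int × Int) : Prop := out = find_largest_table_alt tables max_areas
instance (tables : List (Int × Int × Int)) (max_areas : List (Int × Int × Int)) (out : Int × Int) : Decidable (Spec_find_largest_table tables max_areas out) := by unfold Spec_find_largest_table; infer_instance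

-- ===== CLAIM (what is proved, stated in full; the proofs are below) =====
def Claim_equal_find_largest_table : Prop := ∀ (tables : List (Int × Int × Int)) (max_areas : List (Int × Int × Int)), Dom_find_largest_table tables max_areas → Pre_find_largest_table tables max_areas → Spec_find_largest_table tables max_areas (find_largest_table tables max_areas)

-- ===== LEMMAS AND PROOFS =====

lemma pvBreakIdx_cons (j : Int) (f : Bool) (rest : List (Int × Bool)) (i0 : Int) :
    pvBreakIdx ((j, f) :: rest) i0 = if f then j else pvBreakIdx rest j := rfl

lemma pvFoldl_or (p : (Int × Int × Int) → Bool) (l : List (Int × Int × Int)) (b0 : Bool) :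
    l.foldl (fun b a => b || p a) b0 = (b0 || l.any p) := by
  induction l generalizing b0 with
  | nil => simp
  | cons a l ih => simp only [List.foldl_cons, ih, List.any_cons, Bool.or_assoc]

-- one pass of A over found_fit = tables.map g just ORs in this area's fit test, pointwise
lemma pvStepA_map (tables : List (Int × Int × Int)) (g : (Int × Int × Int) → Bool) (a : Int × Int × Int) :
    pvStepA tables (tables.map g) a = tables.map (fun t => g t || pvFitsB t a) := by
  apply List.ext_getElem
  · simp [pvStepA]
  · intro k h1 h2
    have hk : k < tables.length := by simpa [pvStepA] using h1
    simp [pvStepA, PySem.List.getElem_enumerate, hk, pvFitsB]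
    rcases g tables[k] with _ | _ <;> simp

-- the whole found_fit fold is tables.map of the any-fit test
lemma pvFold_map (tables : List (Int × Int × Int)) (max_areas : List (Int × Int × Int)) :
    max_areas.foldl (pvStepA tables) (List.replicate tables.length false)
      = tables.map (fun t => max_areas.any (fun a => pvFitsB t a)) := by
  have key : ∀ (ms : List (Int × Int × Int)) (g : (Int × Int × Int) → Bool),
      ms.foldl (pvStepA tables) (tables.map g)
        = tables.map (fun t => ms.foldl (fun b a => b || pvFitsB t a) (g t)) := by
    intro ms
    induction ms with
    | nil => intro g; rfl
    | cons a ms ih =>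
      intro g
      simp only [List.foldl_cons, pvStepA_map]
      exact ih _
  have hrep : List.replicate tables.length false = tables.map (fun _ => false) := by
    simp [List.map_const']
  rw [hrep, key]
  refine List.map_congr_left (fun t _ => ?_)
  simp [pvFoldl_or]

-- the break-scan over enumerate, followed by tables[i], is find?-or-last
lemma pvBreak_lookup (fit : (Int × Int × Int) → Bool) :
    ∀ (l pre : List (Int × Int × Int)) (i0 : Int) (h : l ≠ []),
      PySem.List.pyGet? (pre ++ l) (pvBreakIdx (PySem.List.enumerate (l.map fit) (pre.length : Int)) i0)
        = some ((l.find? fit).getD (l.getLast h)) := by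
  intro l
  induction l with
  | nil => intro _ _ h; exact absurd rfl h
  | cons t l ih =>
    intro pre i0 _
    rcases l with _ | ⟨t', l'⟩
    · rw [List.map_cons, List.map_nil, PySem.List.enumerate_cons, PySem.List.enumerate_nil,
        pvBreakIdx_cons]
      split_ifs with hf <;>
        simp [pvBreakIdx, List.find?, hf]
    · rw [List.map_cons, PySem.List.enumerate_cons, pvBreakIdx_cons]
      split_ifs with hf
      · simp [List.find?, hf]
      · have hlen : ((pre ++ [t]).length : Int) = (pre.length : Int) + 1 := by simp
        have hih := ih (pre ++ [t]) (pre.length : Int) (by simp)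
        rw [hlen, List.append_assoc, List.singleton_append] at hih
        rw [hih]
        simp [List.find?, hf, List.getLast_cons]

theorem pv_main (tables max_areas : List (Int × Int × Int)) (h : tables ≠ []) :
    find_largest_table tables max_areas = find_largest_table_alt tables max_areas := by
  unfold find_largest_table find_largest_table_alt
  simp only [pvFold_map]
  set fit : (Int × Int × Int) → Bool := fun t => max_areas.any (fun a => pvFitsB t a) with hfit
  have hb := pvBreak_lookup fit tables [] 0 h
  simp only [List.nil_append, List.length_nil, Nat.cast_zero] at hb
  rw [hb]
  rcases hfind : tables.find? fit with _ | t
  · have hlast : PySem.List.pyGet? tables (-1) = some (tables.getLast h) := by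
      rw [PySem.List.pyGet?_neg_one]
      exact List.getLast?_eq_some_getLast h
    simp [hlast]
  · simp

-- ===== VERDICT (by name: the statement is the Claim_ definition above) =====
theorem find_largest_table_spec : Claim_equal_find_largest_table := by
  intro tables max_areas _ hpre
  unfold Spec_find_largest_table
  exact pv_main tables max_areas hpre
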